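-- pv_equiv track=rewrite | github.com/htem/cb2_project_analysis | analysis/lib_weight_correlation.py | compute_mf_share
-- ===== SOURCE A (Python) =====
-- import itertools
-- from collections import defaultdict
--
-- def compute_mf_share(mf_grc_db, grcs):
--     share_db = defaultdict(lambda: defaultdict(int))
--     for n1, n2 in itertools.permutations(grcs, 2):
--         if n1 not in mf_grc_db or n2 not in mf_grc_db:
--             continue
--         i_set = set(mf_grc_db[n1].keys())
--         j_set = set(mf_grc_db[n2].keys())
--         common_mfs = i_set & j_set
--         if len(common_mfs):
--             share_db[n1][n2] = len(common_mfs)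
--     return share_db
-- ===== SOURCE B (Python) =====
-- def compute_mf_share(mf_grc_db, grcs):
--     # Invert the db once (mf -> grcs carrying it), then read each ordered
--     # pair's shared-mf count off an accumulated co-occurrence counter, instead
--     # of intersecting two key sets for every ordered pair of grc occurrences.
--     order = [g for g in dict.fromkeys(grcs) if g in mf_grc_db]
--     members = {}
--     for g in order:
--         for mf in set(mf_grc_db[g].keys()):
--             members.setdefault(mf, []).append(g)
--     cnt = {}
--     for gl in members.values():
--         for g1 in gl:
--             for g2 in gl:
--                 cnt[(g1, g2)] = cnt.get((g1, g2), 0) + 1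
--     share = {}
--     for i, n1 in enumerate(grcs):
--         for j, n2 in enumerate(grcs):
--             if j != i:
--                 c = cnt.get((n1, n2), 0)
--                 if c:
--                     share.setdefault(n1, {})[n2] = c
--     return share
-- ===== Notes on version B (the rewrite author's own statement) =====
-- stated objective: alternative
-- what changed: B inverts mf_grc_db once into mf->grc incidence lists and accumulates a co-occurrence counter, so each ordered pair's shared-mf count is a single counter lookup instead of building and intersecting two key sets per pair; it trades per-pair set intersections for an upfront counter costing sum over mfs of deg(mf)^2.
import Mathlib
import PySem

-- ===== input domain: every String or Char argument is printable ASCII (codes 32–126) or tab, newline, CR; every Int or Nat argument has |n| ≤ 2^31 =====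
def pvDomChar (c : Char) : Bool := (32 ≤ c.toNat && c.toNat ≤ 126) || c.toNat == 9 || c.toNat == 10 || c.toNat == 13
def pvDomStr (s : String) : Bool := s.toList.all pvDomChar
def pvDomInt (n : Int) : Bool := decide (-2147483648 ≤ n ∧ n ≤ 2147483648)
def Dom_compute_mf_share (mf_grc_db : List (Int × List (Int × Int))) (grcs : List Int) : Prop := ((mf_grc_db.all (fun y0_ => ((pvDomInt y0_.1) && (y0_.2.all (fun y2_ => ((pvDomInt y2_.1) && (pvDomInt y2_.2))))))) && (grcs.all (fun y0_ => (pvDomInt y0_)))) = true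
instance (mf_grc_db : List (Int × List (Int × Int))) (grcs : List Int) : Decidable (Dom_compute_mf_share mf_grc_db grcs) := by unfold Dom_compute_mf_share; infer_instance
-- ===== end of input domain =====

-- B inverts mf_grc_db once into mf -> grc incidence lists and reads each ordered pair's
-- shared-mf count off an accumulated co-occurrence counter, instead of building and
-- intersecting two key sets for every ordered pair of grc occurrences (objective: alternative).

-- ===== PORT A =====
def compute_mf_share (mf_grc_db : List (Int × List (Int × Int))) (grcs : List Int) : List (Int × List (Int × Int)) :=
  let db := PySem.Dict.mk mf_grc_db
  let share :=
    (PySem.List.permutations grcs 2).foldl (fun sh p =>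
      match p with
      | [n1, n2] =>
        if db.contains n1 && db.contains n2 then
          let i_set := PySem.Set.ofList ((db.getD n1 []).map (·.1))
          let j_set := PySem.Set.ofList ((db.getD n2 []).map (·.1))
          let common := PySem.Set.inter i_set j_set
          if common.length ≠ 0 then
            sh.insert n1 ((sh.getD n1 PySem.Dict.empty).insert n2 (common.length : Int))
          else sh
        else sh
      | _ => sh)
      (PySem.Dict.empty : PySem.Dict Int (PySem.Dict Int Int))
  share.items.map (fun q => (q.1, q.2.items))

-- ===== PORT B =====
def compute_mf_share_alt (mf_grc_db : List (Int × List (Int × Int))) (grcs : List Int) : List (Int × List (Int × Int)) :=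
  let db := PySem.Dict.mk mf_grc_db
  let order := (PySem.List.dedup grcs).filter (fun g => db.contains g)
  let members : PySem.Dict Int (List Int) :=
    order.foldl (fun m g =>
      (PySem.Set.ofList ((db.getD g []).map (·.1))).foldl
        (fun m mf => m.modify mf [] (fun l => l ++ [g])) m)
      PySem.Dict.empty
  let cnt : PySem.Dict (Int × Int) Int :=
    members.values.foldl (fun c gl =>
      gl.foldl (fun c g1 =>
        gl.foldl (fun c g2 => c.modify (g1, g2) 0 (· + 1)) c) c)
      PySem.Dict.empty
  let share : PySem.Dict Int (PySem.Dict Int Int) :=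
    (PySem.List.enumerate grcs).foldl (fun sh ip =>
      (PySem.List.enumerate grcs).foldl (fun sh jp =>
        if jp.1 ≠ ip.1 then
          let c := cnt.getD (ip.2, jp.2) 0
          if c ≠ 0 then sh.insert ip.2 ((sh.getD ip.2 PySem.Dict.empty).insert jp.2 c) else sh
        else sh) sh)
      (PySem.Dict.empty : PySem.Dict Int (PySem.Dict Int Int))
  share.items.map (fun q => (q.1, q.2.items))

-- ===== PRECONDITION & SPEC =====
def Spec_compute_mf_share (mf_grc_db : List (Int × List (Int × Int))) (grcs : List Int) (out : List (Int × List (Int × Int))) : Prop := out = compute_mf_share_alt mf_grc_db grcs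
instance (mf_grc_db : List (Int × List (Int × Int))) (grcs : List Int) (out : List (Int × List (Int × Int))) : Decidable (Spec_compute_mf_share mf_grc_db grcs out) := by unfold Spec_compute_mf_share; infer_instance

-- ===== CLAIM (what is proved, stated in full; the proofs are below) =====
def Claim_equal_compute_mf_share : Prop := ∀ (mf_grc_db : List (Int × List (Int × Int))) (grcs : List Int), Dom_compute_mf_share mf_grc_db grcs → Spec_compute_mf_share mf_grc_db grcs (compute_mf_share mf_grc_db grcs)

-- ===== LEMMAS AND PROOFS =====

-- Proof-side abbreviations (used only by the proofs, not by the ports).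
def pvDB (m : List (Int × List (Int × Int))) : PySem.Dict Int (List (Int × Int)) := PySem.Dict.mk m

def pvKs (db : PySem.Dict Int (List (Int × Int))) (g : Int) : List Int :=
  PySem.Set.ofList ((db.getD g []).map (·.1))

def pvW (db : PySem.Dict Int (List (Int × Int))) (a b : Int) : Int :=
  ((PySem.Set.inter (pvKs db a) (pvKs db b)).length : Int)

def pvP (db : PySem.Dict Int (List (Int × Int))) (q : Int × Int) : Bool :=
  (db.contains q.1 && db.contains q.2) && decide ((PySem.Set.inter (pvKs db q.1) (pvKs db q.2)).length ≠ 0)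

def pvPairsRec (c : List Int) : List Int → List (Int × Int)
  | [] => []
  | x :: t => ((c ++ t).map (fun b => (x, b))) ++ pvPairsRec (c ++ [x]) t

def pvOrder (m : List (Int × List (Int × Int))) (grcs : List Int) : List Int :=
  (PySem.List.dedup grcs).filter (fun g => (pvDB m).contains g)

def pvMembers (db : PySem.Dict Int (List (Int × Int))) (present : List Int) : PySem.Dict Int (List Int) :=
  present.foldl (fun m g => (pvKs db g).foldl (fun m mf => m.modify mf [] (fun l => l ++ [g])) m) PySem.Dict.empty

def pvCnt (db : PySem.Dict Int (List (Int × Int))) (present : List Int) : PySem.Dict (Int × Int) Int :=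
  (pvMembers db present).values.foldl (fun c gl =>
    gl.foldl (fun c g1 =>
      gl.foldl (fun c g2 => c.modify (g1, g2) 0 (· + 1)) c) c)
    PySem.Dict.empty

def pvBig (db : PySem.Dict Int (List (Int × Int))) (present : List Int) : List (Int × Int) :=
  (pvMembers db present).values.flatMap (fun gl =>
    gl.flatMap (fun g1 => gl.map (fun g2 => (g1, g2))))

-- B's ordered pair stream: (grcs[i], grcs[j]) for all positions i, j with j ≠ i.
def pvLB (grcs : List Int) : List (Int × Int) :=
  (PySem.List.enumerate grcs).flatMap (fun ip =>
    (((PySem.List.enumerate grcs).filter (fun jp => decide (jp.1 ≠ ip.1))).map (fun jp => (ip.2, jp.2))))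

-- ---- small generic list lemmas ----
theorem pvFlatMap_ite_singleton (l : List Int) (q : Int → Bool) :
    l.flatMap (fun x => if q x then [x] else []) = l.filter q := by
  induction l with
  | nil => rfl
  | cons x t ih =>
    by_cases hx : q x <;> simp [List.flatMap_cons, ih, hx]

theorem pvSum_map_ite (l : List Int) (hl : l.Nodup) (a : Int) (k : Nat) :
    (l.map (fun x => if x = a then k else 0)).sum = if a ∈ l then k else 0 := by
  induction l with
  | nil => simp
  | cons x t ih =>
    rw [List.map_cons, List.sum_cons]
    by_cases hx : x = a
    · subst hx
      have hnt : x ∉ t := (List.nodup_cons.mp hl).1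
      have hz : (t.map (fun y => if y = x then k else 0)).sum = 0 := by
        rw [List.map_congr_left (g := fun _ => 0) (fun y hy => by
          have : y ≠ x := fun h => hnt (h ▸ hy)
          simp [this])]
        simp
      simp [hz]
    · rw [ih (List.nodup_cons.mp hl).2]
      have hmm : (a ∈ x :: t) ↔ (a ∈ t) := by
        constructor
        · intro h; rcases List.mem_cons.mp h with h | h
          · exact absurd h.symm hx
          · exact h
        · exact fun h => List.mem_cons_of_mem _ h
      simp [hx, hmm]

theorem pvSum_indicator {α : Type} (l : List α) (p : α → Bool) :
    (l.map (fun x => if p x = true then 1 else 0)).sum = l.countP p := by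
  induction l with
  | nil => rfl
  | cons x t ih =>
    by_cases hx : p x <;> simp [ih, hx, Nat.add_comm]

-- a loop 'for x in l: if p x: acc = g acc (h x)' is a fold over the filtered, mapped list
theorem pvFoldl_ite_filter_map {σ α β : Type} (g : σ → β → σ) (p : α → Prop) [DecidablePred p] (h : α → β) :
    ∀ (l : List α) (init : σ),
    (l.foldl (fun s x => if p x then g s (h x) else s) init)
      = ((l.filter (fun x => decide (p x))).map h).foldl g init := by
  intro l
  induction l with
  | nil => intro init; rfl
  | cons x t ih =>
    intro init
    rw [List.foldl_cons, List.filter_cons]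
    by_cases hx : p x
    · simp only [hx, decide_true, if_pos, List.map_cons, List.foldl_cons]
      exact ih (g init (h x))
    · simp only [hx, decide_false, if_false, Bool.false_eq_true]
      exact ih init

-- ---- the permutations pair list ----
theorem pvPerm0 (xs : List Int) : PySem.List.permutations xs 0 = [[]] := by
  rw [PySem.List.permutations]

theorem pvPerm1 (xs : List Int) : PySem.List.permutations xs 1 = xs.map (fun a => [a]) := by
  rw [PySem.List.permutations]
  simp only [pvPerm0, List.map_cons, List.map_nil]
  induction xs with
  | nil => rfl
  | cons x t ih =>
    rw [List.length_cons, List.range_succ_eq_map, List.flatMap_cons, List.flatMap_map]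
    simp only [List.getElem?_cons_zero, List.getElem?_cons_succ]
    rw [ih]
    simp

def pvIdxPairs (c : List Int) (xs : List Int) : List (List Int) :=
  (List.range xs.length).flatMap (fun i =>
    match xs[i]? with
    | none => []
    | some a => (c ++ xs.eraseIdx i).map (fun b => [a, b]))

theorem pvIdxPairs_eq_rec (xs : List Int) :
    ∀ (c : List Int), pvIdxPairs c xs = (pvPairsRec c xs).map (fun q => [q.1, q.2]) := by
  induction xs with
  | nil => intro c; rfl
  | cons x t ih =>
    intro c
    unfold pvIdxPairs
    rw [List.length_cons, List.range_succ_eq_map, List.flatMap_cons, List.flatMap_map]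
    simp only [List.getElem?_cons_zero, List.getElem?_cons_succ, List.eraseIdx_cons_succ,
      List.eraseIdx_zero, List.tail_cons]
    have htail := ih (c ++ [x])
    unfold pvIdxPairs at htail
    simp only [List.append_assoc, List.singleton_append] at htail
    rw [htail]
    conv_rhs => rw [pvPairsRec, List.map_append, List.map_map]
    rfl

theorem pvPerm2_pairs (grcs : List Int) :
    PySem.List.permutations grcs 2 = (pvPairsRec [] grcs).map (fun q => [q.1, q.2]) := by
  have h2 : PySem.List.permutations grcs 2 = pvIdxPairs [] grcs := by
    unfold pvIdxPairs
    rw [PySem.List.permutations]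
    apply List.flatMap_congr
    intro i _
    cases hg : grcs[i]? with
    | none => simp
    | some a => simp [pvPerm1, List.map_map, Function.comp]
  rw [h2, pvIdxPairs_eq_rec grcs []]

theorem pvPR_mem (t : List Int) :
    ∀ (c : List Int) (q : Int × Int), q ∈ pvPairsRec c t → q.1 ∈ t ∧ q.2 ∈ c ++ t := by
  induction t with
  | nil => intro c q h; cases h
  | cons x t ih =>
    intro c q h
    rw [pvPairsRec] at h
    rcases List.mem_append.mp h with h1 | h2
    · obtain ⟨b, hb, hq⟩ := List.mem_map.mp h1
      subst hq
      refine ⟨List.mem_cons_self, ?_⟩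
      rcases List.mem_append.mp hb with hc | ht
      · exact List.mem_append.mpr (.inl hc)
      · exact List.mem_append.mpr (.inr (List.mem_cons_of_mem _ ht))
    · obtain ⟨h1', h2'⟩ := ih (c ++ [x]) q h2
      refine ⟨List.mem_cons_of_mem _ h1', ?_⟩
      rw [List.append_assoc, List.singleton_append] at h2'
      exact h2'

-- ---- B's pair stream is A's pair stream ----
-- the index-level analogue of pvPairsRec: i-th block pairs xs[i] with xs minus position i
def pvIdxPairsP (c : List Int) (xs : List Int) : List (Int × Int) :=
  (List.range xs.length).flatMap (fun i =>
    match xs[i]? with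
    | none => []
    | some a => (c ++ xs.eraseIdx i).map (fun b => (a, b)))

theorem pvIdxPairsP_eq_rec (xs : List Int) :
    ∀ (c : List Int), pvIdxPairsP c xs = pvPairsRec c xs := by
  induction xs with
  | nil => intro c; rfl
  | cons x t ih =>
    intro c
    unfold pvIdxPairsP
    rw [List.length_cons, List.range_succ_eq_map, List.flatMap_cons, List.flatMap_map]
    simp only [List.getElem?_cons_zero, List.getElem?_cons_succ, List.eraseIdx_cons_succ,
      List.eraseIdx_zero, List.tail_cons]
    have htail := ih (c ++ [x])
    unfold pvIdxPairsP at htail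
    simp only [List.append_assoc, List.singleton_append] at htail
    rw [htail]
    conv_rhs => rw [pvPairsRec]

theorem pvEnumerate_eq_map_range (xs : List Int) :
    ∀ (s : Int), PySem.List.enumerate xs s = (List.range xs.length).map (fun k : Nat => (s + (k : Int), xs.getD k 0)) := by
  induction xs with
  | nil => intro s; rfl
  | cons x t ih =>
    intro s
    rw [PySem.List.enumerate_cons, ih (s + 1), List.length_cons, List.range_succ_eq_map,
      List.map_cons, List.map_map]
    have h0 : (s + ((0 : Nat) : Int), (x :: t).getD 0 0) = (s, x) := by simp
    rw [h0]
    congr 1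
    apply List.map_congr_left
    intro k _
    simp only [Function.comp, List.getD_cons_succ]
    have hc : s + ((k + 1 : Nat) : Int) = (s + 1) + ((k : Nat) : Int) := by push_cast; ring
    rw [hc]

theorem pvEnumFilterMap (xs : List Int) :
    ∀ (s : Int) (i : Nat),
    (((PySem.List.enumerate xs s).filter (fun jp => decide (jp.1 ≠ s + (i : Int)))).map (·.2))
      = xs.eraseIdx i := by
  induction xs with
  | nil => intro s i; rfl
  | cons x t ih =>
    intro s i
    rw [PySem.List.enumerate_cons, List.filter_cons]
    cases i with
    | zero =>
      have h0 : (decide (((s, x) : Int × Int).1 ≠ s + ((0 : Nat) : Int))) = false := by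
        simp
      rw [h0]
      simp only [Bool.false_eq_true, if_false, List.eraseIdx_zero, List.tail_cons]
      have hall : (PySem.List.enumerate t (s + 1)).filter (fun jp => decide (jp.1 ≠ s + ((0 : Nat) : Int)))
          = PySem.List.enumerate t (s + 1) := by
        apply List.filter_eq_self.mpr
        intro jp hjp
        obtain ⟨k, hk, hjp'⟩ := (PySem.List.mem_enumerate_iff _ _ _).mp hjp
        subst hjp'
        simp only [decide_eq_true_eq]
        push_cast
        omega
      rw [hall, PySem.List.map_snd_enumerate]
    | succ k =>
      have h1 : (decide (((s, x) : Int × Int).1 ≠ s + ((k + 1 : Nat) : Int))) = true := by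
        simp only [decide_eq_true_eq]
        push_cast
        omega
      rw [h1]
      simp only [if_true, List.map_cons, List.eraseIdx_cons_succ]
      congr 1
      have hsh : ∀ jp : Int × Int, (decide (jp.1 ≠ s + ((k + 1 : Nat) : Int)))
          = (decide (jp.1 ≠ (s + 1) + ((k : Nat) : Int))) := by
        intro jp
        have : s + ((k + 1 : Nat) : Int) = (s + 1) + ((k : Nat) : Int) := by push_cast; ring
        rw [this]
      rw [List.filter_congr (fun jp _ => hsh jp)]
      exact ih (s + 1) k

theorem pvLB_eq (grcs : List Int) : pvLB grcs = pvPairsRec [] grcs := by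
  rw [← pvIdxPairsP_eq_rec grcs []]
  unfold pvLB
  have hinner : ∀ ip ∈ PySem.List.enumerate grcs 0,
      (((PySem.List.enumerate grcs 0).filter (fun jp => decide (jp.1 ≠ ip.1))).map
          (fun jp => (ip.2, jp.2)))
        = (grcs.eraseIdx ip.1.toNat).map (fun b => (ip.2, b)) := by
    intro ip hip
    obtain ⟨k, hk, hipe⟩ := (PySem.List.mem_enumerate_iff _ _ _).mp hip
    have h1 : ip.1 = (0 : Int) + (k : Int) := by rw [hipe]
    have h2 : ip.1.toNat = k := by rw [h1]; simp
    have hmm : ((((PySem.List.enumerate grcs 0).filter (fun jp => decide (jp.1 ≠ ip.1))).map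
          (fun jp => (ip.2, jp.2))))
        = ((((PySem.List.enumerate grcs 0).filter (fun jp => decide (jp.1 ≠ ip.1))).map (·.2)).map
          (fun b => (ip.2, b))) := by
      rw [List.map_map]
      rfl
    rw [hmm, h2]
    congr 1
    rw [show (fun jp : Int × Int => decide (jp.1 ≠ ip.1))
        = (fun jp : Int × Int => decide (jp.1 ≠ (0 : Int) + (k : Int))) from by rw [h1]]
    exact pvEnumFilterMap grcs 0 k
  rw [List.flatMap_congr hinner, pvEnumerate_eq_map_range grcs 0, List.flatMap_map]
  unfold pvIdxPairsP
  apply List.flatMap_congr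
  intro i hi
  have hilt : i < grcs.length := List.mem_range.mp hi
  have hget : grcs[i]? = some grcs[i] := List.getElem?_eq_getElem hilt
  rw [hget]
  simp only [List.nil_append]
  have ht : (((0 : Int) + (i : Int), grcs.getD i 0).1).toNat = i := by simp
  have hgd : grcs.getD i 0 = grcs[i] := List.getD_eq_getElem grcs 0 hilt
  show (grcs.eraseIdx (((0 : Int) + (i : Int), grcs.getD i 0).1).toNat).map
      (fun b => (((0 : Int) + (i : Int), grcs.getD i 0).2, b))
    = (grcs.eraseIdx i).map (fun b => (grcs[i], b))
  rw [ht]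
  apply List.map_congr_left
  intro b _
  rw [show (((0 : Int) + (i : Int), grcs.getD i 0).2) = grcs.getD i 0 from rfl, hgd]

-- ---- the inverted-index co-occurrence counter computes the intersection size ----
theorem pvBlockFilter (ks : List Int) (hk : ks.Nodup) (g m : Int) :
    (((ks.map (fun mf => (mf, g))).filter (fun p => p.1 == m)).map (·.2))
      = if m ∈ ks then [g] else [] := by
  induction ks with
  | nil => simp
  | cons x t ih =>
    have hnt : x ∉ t := (List.nodup_cons.mp hk).1
    have iht := ih (List.nodup_cons.mp hk).2
    rw [List.map_cons, List.filter_cons]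
    by_cases hx : x = m
    · subst hx
      have hmt : x ∉ t := hnt
      simp [iht, hmt]
    · simp only [List.mem_cons]
      have : ¬ (m = x) := fun hh => hx hh.symm
      simp [hx, iht, this]

theorem pvMembers_eq (db : PySem.Dict Int (List (Int × Int))) (present : List Int) :
    pvMembers db present
      = (present.flatMap (fun g => (pvKs db g).map (fun mf => (mf, g)))).foldl
          (fun m (p : Int × Int) => m.modify p.1 [] (fun l => l ++ [p.2])) PySem.Dict.empty := by
  unfold pvMembers
  rw [List.foldl_flatMap]
  simp only [List.foldl_map]

theorem pvMembers_getD (db : PySem.Dict Int (List (Int × Int))) (present : List Int) (m : Int) :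
    (pvMembers db present).getD m [] = present.filter (fun g => decide (m ∈ pvKs db g)) := by
  rw [pvMembers_eq, PySem.Dict.getD_foldl_modify_append, PySem.Dict.getD_empty, List.nil_append,
    List.filter_flatMap, List.map_flatMap]
  rw [List.flatMap_congr (fun g _ => pvBlockFilter (pvKs db g) (PySem.Set.nodup_ofList _) g m)]
  rw [← pvFlatMap_ite_singleton present (fun g => decide (m ∈ pvKs db g))]
  apply List.flatMap_congr
  intro g _
  by_cases hg : m ∈ pvKs db g <;> simp [hg]

theorem pvMembers_keys_nodup (db : PySem.Dict Int (List (Int × Int))) (present : List Int) :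
    (pvMembers db present).keys.Nodup := by
  rw [pvMembers_eq]
  exact PySem.Dict.nodup_keys_foldl_modify_key _ (fun p : Int × Int => p.1) []
    (fun d (p : Int × Int) l => l ++ [p.2]) _ (by simp [PySem.Dict.keys_empty])

theorem pvMembers_keys (db : PySem.Dict Int (List (Int × Int))) (present : List Int) :
    (pvMembers db present).keys = PySem.Set.ofList (present.flatMap (fun g => pvKs db g)) := by
  rw [pvMembers_eq]
  rw [PySem.Dict.keys_foldl_modify_key _ (fun p : Int × Int => p.1) [] (fun d p l => l ++ [p.2])]
  rw [PySem.Dict.keys_empty, PySem.Set.update_nil_left]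
  congr 1
  rw [List.map_flatMap]
  apply List.flatMap_congr
  intro g _
  rw [List.map_map]
  have hid : ((fun p : Int × Int => p.1) ∘ (fun mf : Int => (mf, g))) = id := rfl
  rw [hid, List.map_id]

theorem pvMembers_values (db : PySem.Dict Int (List (Int × Int))) (present : List Int) :
    (pvMembers db present).values
      = (PySem.Set.ofList (present.flatMap (fun g => pvKs db g))).map
          (fun m => present.filter (fun g => decide (m ∈ pvKs db g))) := by
  rw [PySem.Dict.values_eq_map_keys _ (pvMembers_keys_nodup db present) [], pvMembers_keys]
  exact List.map_congr_left (fun m _ => pvMembers_getD db present m)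

theorem pvCnt_eq (db : PySem.Dict Int (List (Int × Int))) (present : List Int) :
    pvCnt db present = (pvBig db present).foldl (fun c q => c.modify q 0 (· + 1)) PySem.Dict.empty := by
  unfold pvCnt pvBig
  simp only [List.foldl_flatMap, List.foldl_map]

theorem pvCnt_getD (db : PySem.Dict Int (List (Int × Int))) (present : List Int) (q : Int × Int) :
    (pvCnt db present).getD q 0 = ((pvBig db present).count q : Int) := by
  rw [pvCnt_eq, PySem.Dict.getD_foldl_modify_add_one, PySem.Dict.getD_empty, zero_add]

theorem pvInnerCount (gl : List Int) (hgl : gl.Nodup) (a b : Int) :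
    (gl.flatMap (fun g1 => gl.map (fun g2 => (g1, g2)))).count (a, b)
      = if a ∈ gl ∧ b ∈ gl then 1 else 0 := by
  rw [List.count_flatMap]
  rw [List.map_congr_left (g := fun g1 => if g1 = a then (if b ∈ gl then 1 else 0) else 0)
    (by
      intro g1 _
      simp only [Function.comp]
      by_cases hg : g1 = a
      · subst hg
        have hinj : Function.Injective (fun g2 : Int => (g1, g2)) := by
          intro u v huv; simpa using huv
        rw [List.count_map_of_injective gl (fun g2 : Int => (g1, g2)) hinj b]
        by_cases hbgl : b ∈ gl
        · rw [List.count_eq_one_of_mem hgl hbgl]; simp [hbgl]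
        · rw [List.count_eq_zero.mpr hbgl]; simp [hbgl]
      · rw [List.count_eq_zero.mpr (by
          intro hmem
          obtain ⟨g2, _, heq⟩ := List.mem_map.mp hmem
          exact hg (congrArg Prod.fst heq))]
        simp [hg])]
  rw [pvSum_map_ite gl hgl a]
  by_cases h1 : a ∈ gl <;> by_cases h2 : b ∈ gl <;> simp [h1, h2]

theorem pvCnt_spec (db : PySem.Dict Int (List (Int × Int))) (present : List Int)
    (hnd : present.Nodup) (a b : Int) (ha : a ∈ present) (hb : b ∈ present) :
    (pvCnt db present).getD (a, b) 0 = pvW db a b := by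
  rw [pvCnt_getD]
  unfold pvBig
  rw [pvMembers_values, List.flatMap_map, List.count_flatMap]
  rw [List.map_congr_left
    (g := fun mk => if (decide (mk ∈ pvKs db a) && decide (mk ∈ pvKs db b)) = true then 1 else 0)
    (by
      intro mk _
      simp only [Function.comp]
      rw [pvInnerCount _ (List.Nodup.filter _ hnd) a b]
      by_cases h1 : mk ∈ pvKs db a <;> by_cases h2 : mk ∈ pvKs db b <;>
        simp [List.mem_filter, ha, hb, h1, h2])]
  rw [pvSum_indicator]
  have hperm : ((PySem.Set.ofList (present.flatMap (fun g => pvKs db g))).filter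
      (fun mk => decide (mk ∈ pvKs db a) && decide (mk ∈ pvKs db b))).Perm
      (PySem.Set.inter (pvKs db a) (pvKs db b)) := by
    rw [List.perm_ext_iff_of_nodup
      (List.Nodup.filter _ (PySem.Set.nodup_ofList _))
      (PySem.Set.nodup_inter (pvKs db a) (pvKs db b)
        (by unfold pvKs; exact PySem.Set.nodup_ofList _))]
    intro mk
    simp only [List.mem_filter, PySem.Set.mem_inter, Bool.and_eq_true, decide_eq_true_eq]
    constructor
    · rintro ⟨_, h1, h2⟩; exact ⟨h1, h2⟩
    · rintro ⟨h1, h2⟩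
      exact ⟨(PySem.Set.mem_ofList _ _).mpr (List.mem_flatMap.mpr ⟨a, ha, h1⟩), h1, h2⟩
  unfold pvW
  exact congrArg _ (by rw [List.countP_eq_length_filter, hperm.length_eq])

theorem pvCnt_absent (db : PySem.Dict Int (List (Int × Int))) (present : List Int)
    (hpres : ∀ g ∈ present, db.contains g = true) (a b : Int)
    (h : db.contains a = false ∨ db.contains b = false) :
    (pvCnt db present).getD (a, b) 0 = 0 := by
  rw [pvCnt_getD]
  have hz : (pvBig db present).count (a, b) = 0 := by
    rw [List.count_eq_zero]
    intro hmem
    unfold pvBig at hmem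
    obtain ⟨gl, hgl, hmem1⟩ := List.mem_flatMap.mp hmem
    obtain ⟨g1, hg1, hmem2⟩ := List.mem_flatMap.mp hmem1
    obtain ⟨g2, hg2, heq⟩ := List.mem_map.mp hmem2
    have hgl' : ∀ g ∈ gl, g ∈ present := by
      intro g hg
      rw [pvMembers_values] at hgl
      obtain ⟨mk, _, hglv⟩ := List.mem_map.mp hgl
      subst hglv
      exact (List.mem_filter.mp hg).1
    have hca : db.contains a = true := by
      have : g1 = a := congrArg Prod.fst heq
      exact this ▸ hpres g1 (hgl' g1 hg1)
    have hcb : db.contains b = true := by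
      have : g2 = b := congrArg Prod.snd heq
      exact this ▸ hpres g2 (hgl' g2 hg2)
    rcases h with h' | h' <;> simp_all
  rw [hz]
  rfl

-- ---- foldl over a pair list rendered as 2-element lists (A's loop over permutations) ----
theorem pvFoldl_pairs {σ : Type} (stepB : σ → Int × Int → σ) (step : σ → List Int → σ)
    (hs : ∀ (sh : σ) (n1 n2 : Int), step sh [n1, n2] = stepB sh (n1, n2)) :
    ∀ (L : List (Int × Int)) (init : σ),
    (L.map (fun q => [q.1, q.2])).foldl step init = L.foldl stepB init := by
  intro L
  induction L with
  | nil => intro init; rfl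
  | cons q t ihL =>
    intro init
    rw [List.map_cons, List.foldl_cons, List.foldl_cons, ihL, hs]

theorem pvOrder_nodup (m : List (Int × List (Int × Int))) (grcs : List Int) :
    (pvOrder m grcs).Nodup :=
  List.Nodup.filter _ (by
    rw [PySem.List.dedup_eq_ofList]
    exact PySem.Set.nodup_ofList _)

-- ---- the two program characterizations: each is a fold over a pair stream ----
theorem pvA_fold (m : List (Int × List (Int × Int))) (grcs : List Int) :
    compute_mf_share m grcs
      = ((pvPairsRec [] grcs).foldl (fun sh q =>
          if pvP (pvDB m) q then
            sh.insert q.1 ((sh.getD q.1 PySem.Dict.empty).insert q.2 (pvW (pvDB m) q.1 q.2))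
          else sh)
          (PySem.Dict.empty : PySem.Dict Int (PySem.Dict Int Int))).items.map
            (fun q => (q.1, q.2.items)) := by
  simp only [compute_mf_share]
  rw [pvPerm2_pairs grcs]
  rw [pvFoldl_pairs (fun sh q =>
      if pvP (pvDB m) q then
        sh.insert q.1 ((sh.getD q.1 PySem.Dict.empty).insert q.2 (pvW (pvDB m) q.1 q.2))
      else sh) _ ?hs]
  case hs =>
    intro sh n1 n2
    show (if ((pvDB m).contains n1 && (pvDB m).contains n2) = true then
            if (PySem.Set.inter (pvKs (pvDB m) n1) (pvKs (pvDB m) n2)).length ≠ 0 then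
              sh.insert n1 ((sh.getD n1 PySem.Dict.empty).insert n2
                ((PySem.Set.inter (pvKs (pvDB m) n1) (pvKs (pvDB m) n2)).length : Int))
            else sh
          else sh)
        = (if pvP (pvDB m) (n1, n2) = true then
            sh.insert n1 ((sh.getD n1 PySem.Dict.empty).insert n2 (pvW (pvDB m) n1 n2))
          else sh)
    unfold pvP pvW
    by_cases h1 : ((pvDB m).contains n1 && (pvDB m).contains n2) = true
    · by_cases h2 : (PySem.Set.inter (pvKs (pvDB m) n1) (pvKs (pvDB m) n2)).length ≠ 0
      · rw [if_pos h1, if_pos h2, if_pos (by rw [h1]; simpa using h2)]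
      · have hz : (PySem.Set.inter (pvKs (pvDB m) n1) (pvKs (pvDB m) n2)).length = 0 :=
          not_not.mp h2
        rw [if_pos h1, if_neg h2, if_neg (by simp [hz])]
    · have h1f : ((pvDB m).contains n1 && (pvDB m).contains n2) = false := Bool.eq_false_iff.mpr h1
      rw [if_neg h1, if_neg (by simp [h1f])]

theorem pvB_fold (m : List (Int × List (Int × Int))) (grcs : List Int) :
    compute_mf_share_alt m grcs
      = ((pvLB grcs).foldl (fun sh (q : Int × Int) =>
          if (pvCnt (pvDB m) (pvOrder m grcs)).getD q 0 ≠ 0 then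
            sh.insert q.1 ((sh.getD q.1 PySem.Dict.empty).insert q.2
              ((pvCnt (pvDB m) (pvOrder m grcs)).getD q 0))
          else sh)
          (PySem.Dict.empty : PySem.Dict Int (PySem.Dict Int Int))).items.map
            (fun q => (q.1, q.2.items)) := by
  show ((PySem.List.enumerate grcs).foldl (fun sh ip =>
      (PySem.List.enumerate grcs).foldl (fun sh jp =>
        if jp.1 ≠ ip.1 then
          let c := (pvCnt (pvDB m) (pvOrder m grcs)).getD (ip.2, jp.2) 0
          if c ≠ 0 then sh.insert ip.2 ((sh.getD ip.2 PySem.Dict.empty).insert jp.2 c) else sh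
        else sh) sh)
      (PySem.Dict.empty : PySem.Dict Int (PySem.Dict Int Int))).items.map
        (fun q => (q.1, q.2.items)) = _
  have hstep : (fun (sh : PySem.Dict Int (PySem.Dict Int Int)) (ip : Int × Int) =>
      (PySem.List.enumerate grcs).foldl (fun sh jp =>
        if jp.1 ≠ ip.1 then
          let c := (pvCnt (pvDB m) (pvOrder m grcs)).getD (ip.2, jp.2) 0
          if c ≠ 0 then sh.insert ip.2 ((sh.getD ip.2 PySem.Dict.empty).insert jp.2 c) else sh
        else sh) sh)
    = (fun sh ip =>
        ((((PySem.List.enumerate grcs).filter (fun jp => decide (jp.1 ≠ ip.1))).map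
            (fun jp => (ip.2, jp.2))).foldl (fun sh (q : Int × Int) =>
          if (pvCnt (pvDB m) (pvOrder m grcs)).getD q 0 ≠ 0 then
            sh.insert q.1 ((sh.getD q.1 PySem.Dict.empty).insert q.2
              ((pvCnt (pvDB m) (pvOrder m grcs)).getD q 0))
          else sh) sh)) := by
    funext sh ip
    exact pvFoldl_ite_filter_map
      (fun (sh : PySem.Dict Int (PySem.Dict Int Int)) (q : Int × Int) =>
        if (pvCnt (pvDB m) (pvOrder m grcs)).getD q 0 ≠ 0 then
          sh.insert q.1 ((sh.getD q.1 PySem.Dict.empty).insert q.2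
            ((pvCnt (pvDB m) (pvOrder m grcs)).getD q 0))
        else sh)
      (fun jp : Int × Int => jp.1 ≠ ip.1)
      (fun jp : Int × Int => (ip.2, jp.2))
      (PySem.List.enumerate grcs) sh
  rw [hstep, ← List.foldl_flatMap]
  rfl

-- ---- main equivalence ----
theorem pvMain (m : List (Int × List (Int × Int))) (grcs : List Int) :
    compute_mf_share m grcs = compute_mf_share_alt m grcs := by
  rw [pvA_fold m grcs, pvB_fold m grcs, pvLB_eq grcs]
  have hpres : ∀ g ∈ pvOrder m grcs, (pvDB m).contains g = true := by
    intro g hg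
    exact (List.mem_filter.mp hg).2
  have hsame : (pvPairsRec [] grcs).foldl (fun sh q =>
      if pvP (pvDB m) q then
        sh.insert q.1 ((sh.getD q.1 PySem.Dict.empty).insert q.2 (pvW (pvDB m) q.1 q.2))
      else sh)
      (PySem.Dict.empty : PySem.Dict Int (PySem.Dict Int Int))
    = (pvPairsRec [] grcs).foldl (fun sh (q : Int × Int) =>
      if (pvCnt (pvDB m) (pvOrder m grcs)).getD q 0 ≠ 0 then
        sh.insert q.1 ((sh.getD q.1 PySem.Dict.empty).insert q.2
          ((pvCnt (pvDB m) (pvOrder m grcs)).getD q 0))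
      else sh)
      (PySem.Dict.empty : PySem.Dict Int (PySem.Dict Int Int)) := by
    apply PySem.List.foldl_congr_mem
    intro sh q hq
    obtain ⟨hq1, hq2'⟩ := pvPR_mem grcs [] q hq
    have hq2 : q.2 ∈ grcs := by simpa using hq2'
    by_cases hca : (pvDB m).contains q.1 = true
    · by_cases hcb : (pvDB m).contains q.2 = true
      · have h1o : q.1 ∈ pvOrder m grcs := by
          unfold pvOrder
          refine List.mem_filter.mpr ⟨?_, hca⟩
          rw [PySem.List.dedup_eq_ofList]
          exact (PySem.Set.mem_ofList _ _).mpr hq1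
        have h2o : q.2 ∈ pvOrder m grcs := by
          unfold pvOrder
          refine List.mem_filter.mpr ⟨?_, hcb⟩
          rw [PySem.List.dedup_eq_ofList]
          exact (PySem.Set.mem_ofList _ _).mpr hq2
        have hcnt : (pvCnt (pvDB m) (pvOrder m grcs)).getD (q.1, q.2) 0 = pvW (pvDB m) q.1 q.2 :=
          pvCnt_spec (pvDB m) (pvOrder m grcs) (pvOrder_nodup m grcs) q.1 q.2 h1o h2o
        have hqq : ((q.1, q.2) : Int × Int) = q := rfl
        rw [hqq] at hcnt
        rw [hcnt]
        unfold pvP pvW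
        by_cases hz : (PySem.Set.inter (pvKs (pvDB m) q.1) (pvKs (pvDB m) q.2)).length = 0
        · rw [if_neg (by simp [hz]), if_neg (by simp [hz])]
        · rw [if_pos (by simp [hca, hcb, hz]), if_pos (by simp [hz])]
      · have hcbf : (pvDB m).contains q.2 = false := Bool.eq_false_iff.mpr hcb
        have hz : (pvCnt (pvDB m) (pvOrder m grcs)).getD (q.1, q.2) 0 = 0 :=
          pvCnt_absent (pvDB m) (pvOrder m grcs) hpres q.1 q.2 (Or.inr hcbf)
        have hqq : ((q.1, q.2) : Int × Int) = q := rfl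
        rw [hqq] at hz
        rw [if_neg (by simp [pvP, hcbf]), if_neg (by simp [hz])]
    · have hcaf : (pvDB m).contains q.1 = false := Bool.eq_false_iff.mpr hca
      have hz : (pvCnt (pvDB m) (pvOrder m grcs)).getD (q.1, q.2) 0 = 0 :=
        pvCnt_absent (pvDB m) (pvOrder m grcs) hpres q.1 q.2 (Or.inl hcaf)
      have hqq : ((q.1, q.2) : Int × Int) = q := rfl
      rw [hqq] at hz
      rw [if_neg (by simp [pvP, hcaf]), if_neg (by simp [hz])]
  rw [hsame]

-- ===== VERDICT (by name: the statement is the Claim_ definition above) =====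
theorem compute_mf_share_spec : Claim_equal_compute_mf_share := by
  intro mf_grc_db grcs _
  unfold Spec_compute_mf_share
  exact pvMain mf_grc_db grcs
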